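-- pv_equiv track=rewrite | github.com/MoranLeven/Python-String-Programs | String8.py | is_alphanumerical
-- ===== SOURCE A (Python) =====
-- def is_alphanumerical(string : str) -> str:
--     num = [str(i) for i in range(0,10)]
--     has_letter = False
--     has_numbers = False
--     for i in string:
--         if i not in num:
--             has_letter = True
--         elif i in num :
--             has_numbers = True
--         if has_numbers and has_letter:
--             return True
--     else:
--         return False
-- ===== SOURCE B (Python) =====
-- def is_alphanumerical(string: str):
--     chars = set(string)
--     digits = set('0123456789')
--     return bool(chars & digits) and bool(chars - digits)
-- ===== Notes on version B (the rewrite author's own statement) =====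
-- stated objective: idiomatic
-- what changed: Replaced A's interleaved per-character scan with two boolean flags and early exit by building the set of distinct characters once and answering with set algebra (chars & digits nonempty, chars - digits nonempty).
import Mathlib
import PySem

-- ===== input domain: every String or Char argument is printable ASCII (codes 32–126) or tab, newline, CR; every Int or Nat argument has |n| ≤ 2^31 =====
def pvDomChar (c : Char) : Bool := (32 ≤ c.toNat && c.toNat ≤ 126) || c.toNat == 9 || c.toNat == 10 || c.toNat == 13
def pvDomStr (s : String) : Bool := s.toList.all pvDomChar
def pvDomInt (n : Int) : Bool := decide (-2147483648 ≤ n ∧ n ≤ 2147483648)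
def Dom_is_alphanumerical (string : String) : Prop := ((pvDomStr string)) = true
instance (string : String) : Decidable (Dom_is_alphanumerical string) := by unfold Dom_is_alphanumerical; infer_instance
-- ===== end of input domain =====

-- B replaces A's flagged scan with early exit by set algebra over the distinct characters (idiomatic rewrite, same result).

-- ===== PORT A =====
-- the scan over the string with the two flags and the mid-loop early return
def isAlphaLoopA (num : List String) : List Char → Bool → Bool → Bool
  | [], _, _ => false
  | i :: rest, has_letter, has_numbers =>
    if !(num.contains (String.ofList [i])) then
      let has_letter := true
      if has_numbers && has_letter then true
      else isAlphaLoopA num rest has_letter has_numbers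
    else
      let has_numbers := if num.contains (String.ofList [i]) then true else has_numbers
      if has_numbers && has_letter then true
      else isAlphaLoopA num rest has_letter has_numbers

def is_alphanumerical (string : String) : Bool :=
  isAlphaLoopA ((PySem.List.pyRange 0 10 1).map PySem.Int.toStr) string.toList false false

-- ===== PORT B =====
def is_alphanumerical_alt (string : String) : Bool :=
  let chars := PySem.Set.ofList string.toList
  let digits := PySem.Set.ofList "0123456789".toList
  !(PySem.Set.inter chars digits).isEmpty && !(PySem.Set.diff chars digits).isEmpty

-- ===== PRECONDITION & SPEC =====
def Spec_is_alphanumerical (string : String) (out : Bool) : Prop := out = is_alphanumerical_alt string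
instance (string : String) (out : Bool) : Decidable (Spec_is_alphanumerical string out) := by unfold Spec_is_alphanumerical; infer_instance

-- ===== CLAIM (what is proved, stated in full; the proofs are below) =====
def Claim_equal_is_alphanumerical : Prop := ∀ (string : String), Dom_is_alphanumerical string → Spec_is_alphanumerical string (is_alphanumerical string)

-- ===== LEMMAS AND PROOFS =====

lemma num_eval : ((PySem.List.pyRange 0 10 1).map PySem.Int.toStr)
    = ("0123456789".toList).map (fun d => String.ofList [d]) := by decide

lemma mem_num_iff (c : Char) :
    (("0123456789".toList).map (fun d => String.ofList [d])).contains (String.ofList [c])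
      = ("0123456789".toList).contains c := by
  rw [Bool.eq_iff_iff]
  simp only [List.contains_iff_mem, List.mem_map]
  constructor
  · rintro ⟨d, hd, he⟩
    have hdc : d = c := by
      have := congrArg String.toList he; simpa using this
    exact hdc ▸ hd
  · intro h; exact ⟨c, h, rfl⟩

lemma loopA_char (num : List String) (cs : List Char) (hl hn : Bool)
    (h : (hn && hl) = false) :
    isAlphaLoopA num cs hl hn
      = ((hn || cs.any (fun c => num.contains (String.ofList [c])))
          && (hl || cs.any (fun c => !(num.contains (String.ofList [c]))))) := by
  induction cs generalizing hl hn with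
  | nil =>
    simp only [isAlphaLoopA, List.any_nil, Bool.or_false]
    exact h.symm
  | cons c rest ih =>
    rcases hd : num.contains (String.ofList [c]) with _ | _ <;>
      rcases hhl : hl with _ | _ <;> rcases hhn : hn with _ | _ <;>
      simp_all [isAlphaLoopA]

lemma inter_nonempty (cs : List Char) :
    (!(PySem.Set.inter (PySem.Set.ofList cs) (PySem.Set.ofList "0123456789".toList)).isEmpty)
      = cs.any (fun c => ("0123456789".toList).contains c) := by
  rw [Bool.eq_iff_iff, Bool.not_eq_true']
  rw [List.isEmpty_eq_false_iff_exists_mem]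
  simp only [PySem.Set.mem_inter, PySem.Set.mem_ofList, List.any_eq_true, List.contains_iff_mem]

lemma diff_nonempty (cs : List Char) :
    (!(PySem.Set.diff (PySem.Set.ofList cs) (PySem.Set.ofList "0123456789".toList)).isEmpty)
      = cs.any (fun c => !(("0123456789".toList).contains c)) := by
  rw [Bool.eq_iff_iff, Bool.not_eq_true']
  rw [List.isEmpty_eq_false_iff_exists_mem]
  simp only [PySem.Set.mem_diff, PySem.Set.mem_ofList, List.any_eq_true,
    Bool.not_eq_true']
  simp

-- ===== VERDICT (by name: the statement is the Claim_ definition above) =====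
theorem is_alphanumerical_spec : Claim_equal_is_alphanumerical := by
  intro s _
  unfold Spec_is_alphanumerical is_alphanumerical is_alphanumerical_alt
  rw [num_eval, loopA_char _ _ _ _ rfl]
  simp only [Bool.false_or]
  rw [inter_nonempty, diff_nonempty]
  simp only [mem_num_iff]
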